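-- pv_equiv track=rewrite | github.com/Nghiep16052005/learning_python | ham/binh_phuong_nguyen_to_1.py | check
-- ===== SOURCE A (Python) =====
-- import math
--
-- def check(n):
--     for i in range ( 2,math.isqrt(n)+1):
--         if n % i == 0: # tim duoc uoc so cua i
--             dem = 0
--             while n % i ==0 :
--                 dem += 1
--                 n //= i
--             if dem >= 2:
--                 return True
--     return False
-- ===== SOURCE B (Python) =====
-- import math
--
-- def check(n):
--     # n is non-squarefree iff some i in [2, isqrt(n)] has i*i dividing n:
--     # any squared prime factor p satisfies p <= sqrt(n), and any i with
--     # i*i | n has a prime factor p with p*p | n. No mutation, no counting.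
--     return any(n % (i * i) == 0 for i in range(2, math.isqrt(n) + 1))
-- ===== Notes on version B (the rewrite author's own statement) =====
-- stated objective: simpler
-- what changed: Replaced the factor-and-count loop (strip each found divisor, count its multiplicity, test >= 2) by a direct one-line square-divisibility scan: return True iff some i in [2, isqrt(n)] has n % (i*i) == 0; no mutation of n, no inner while loop, no counter.
import Mathlib
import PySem

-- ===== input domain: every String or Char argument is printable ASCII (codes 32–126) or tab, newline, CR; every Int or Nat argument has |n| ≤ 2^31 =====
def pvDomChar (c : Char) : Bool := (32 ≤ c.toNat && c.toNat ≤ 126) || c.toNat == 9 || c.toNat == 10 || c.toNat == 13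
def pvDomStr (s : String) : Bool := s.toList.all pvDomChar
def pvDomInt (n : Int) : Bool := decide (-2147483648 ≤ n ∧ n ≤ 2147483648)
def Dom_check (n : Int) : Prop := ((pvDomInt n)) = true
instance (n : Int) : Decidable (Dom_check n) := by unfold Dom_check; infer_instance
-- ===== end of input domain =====

-- B replaces A's factor-and-count strategy (mutating n, inner while, multiplicity counter)
-- by a direct square-divisibility scan over the same range; objective: simpler.
-- (A's local mutation of n is a reassignment of a by-value int parameter, invisible to callers.)

-- ===== PORT A =====

-- math.isqrt, exact for 0 ≤ n (Pre_check); Python raises ValueError for n < 0 (excluded by Pre_check)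
def pyIsqrt (n : Int) : Int := (Nat.sqrt n.toNat : Int)

-- the inner `while n % i == 0: dem += 1; n //= i`; the 0 < m / 2 ≤ i conjuncts only
-- make the recursion total (they hold invariantly at every actual call site)
def stripA (i : Int) (m : Int) (dem : Int) : Int × Int :=
  if h : PySem.Int.mod m i = 0 ∧ 0 < m ∧ 2 ≤ i then
    stripA i (PySem.Int.floordiv m i) (dem + 1)
  else (dem, m)
termination_by m.toNat
decreasing_by
  rcases h with ⟨_, hm, hi⟩
  rw [PySem.Int.floordiv_eq_ediv_of_pos (by omega)]
  have h2 : 0 ≤ m / i := Int.ediv_nonneg (by omega) (by omega)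
  have h3 : i * (m / i) + m % i = m := Int.mul_ediv_add_emod m i
  have h4 : 0 ≤ m % i := Int.emod_nonneg m (by omega)
  have h5 : 2 * (m / i) ≤ i * (m / i) := by
    exact mul_le_mul_of_nonneg_right (by omega) h2
  omega

-- the `for i in range(...)` loop with its early returns and the mutated n as state
def checkA : Int → List Int → Bool
  | _, [] => false
  | m, i :: rest =>
    if PySem.Int.mod m i = 0 then
      let p := stripA i m 0
      if 2 ≤ p.1 then true else checkA p.2 rest
    else checkA m rest

def check (n : Int) : Bool := checkA n (PySem.List.pyRange 2 (pyIsqrt n + 1) 1)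

-- ===== PORT B =====
def check_alt (n : Int) : Bool :=
  (PySem.List.pyRange 2 (pyIsqrt n + 1) 1).any (fun i => PySem.Int.mod n (i * i) == 0)

-- ===== PRECONDITION & SPEC =====
-- math.isqrt raises ValueError for n < 0 (in both A and B); Pre_check keeps exactly the inputs A returns on.
def Pre_check (n : Int) : Prop := 0 ≤ n
instance (n : Int) : Decidable (Pre_check n) := by unfold Pre_check; infer_instance
def pvWitness_check : Int := (12)

def Spec_check (n : Int) (out : Bool) : Prop := out = check_alt n
instance (n : Int) (out : Bool) : Decidable (Spec_check n out) := by unfold Spec_check; infer_instance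

-- ===== CLAIM (what is proved, stated in full; the proofs are below) =====
def Claim_equal_check : Prop := ∀ (n : Int), Dom_check n → Pre_check n → Spec_check n (check n)

-- ===== LEMMAS AND PROOFS =====

theorem stripA_spec (i : Int) (hi : 2 ≤ i) (m dem : Int) (hm : 0 < m) :
    ∃ (e : Nat) (m' : Int), stripA i m dem = (dem + e, m') ∧ m = i ^ e * m' ∧ 0 < m' ∧
      ¬ i ∣ m' ∧ (i ∣ m → 1 ≤ e) := by
  rw [stripA]
  by_cases hd : PySem.Int.mod m i = 0
  · rw [dif_pos ⟨hd, hm, hi⟩]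
    have hdvd : i ∣ m := (PySem.Int.mod_eq_zero_iff_dvd m i).mp hd
    obtain ⟨c, hc⟩ := hdvd
    have hc0 : 0 < c := by
      rcases lt_trichotomy c 0 with h | h | h
      · have : i * c < 0 := mul_neg_of_pos_of_neg (by omega) h
        omega
      · rw [h, mul_zero] at hc; omega
      · exact h
    have hfd : PySem.Int.floordiv m i = c := by
      rw [PySem.Int.floordiv_eq_ediv_of_pos (by omega : (0:Int) < i), hc,
        Int.mul_ediv_cancel_left _ (by omega : i ≠ 0)]
    rw [hfd]
    obtain ⟨e, m', h1, h2, h3, h4, _⟩ := stripA_spec i hi c (dem + 1) hc0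
    refine ⟨e + 1, m', ?_, ?_, h3, h4, fun _ => by omega⟩
    · rw [h1]; congr 1; push_cast; ring
    · rw [hc, h2]; ring
  · rw [dif_neg (by tauto)]
    have hnd : ¬ i ∣ m := fun h => hd ((PySem.Int.mod_eq_zero_iff_dvd m i).mpr h)
    exact ⟨0, m, by simp, by simp, hm, hnd, fun h => absurd h hnd⟩
termination_by m.toNat
decreasing_by
  have h5 : 2 * c ≤ i * c := mul_le_mul_of_nonneg_right (by omega) (by omega)
  omega

-- within A's loop, a state with no divisor below i that i itself divides forces i prime
theorem state_prime (i m : Int) (hi : 2 ≤ i) (_hm : 0 < m)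
    (hinv : ∀ j : Int, 2 ≤ j → j < i → ¬ j ∣ m) (hdvd : i ∣ m) : Prime i := by
  rw [Int.prime_iff_natAbs_prime]
  rw [Nat.prime_def_lt]
  refine ⟨by omega, fun j hj hjd => ?_⟩
  by_contra hne
  have hj0 : j ≠ 0 := by
    rintro rfl
    have : i.natAbs = 0 := Nat.eq_zero_of_zero_dvd hjd
    omega
  have hji : (j : Int) ∣ i := by
    have : (j : Int) ∣ (i.natAbs : Int) := Int.natCast_dvd_natCast.mpr hjd
    rwa [Int.natAbs_of_nonneg (by omega)] at this
  have hjm : (j : Int) ∣ m := dvd_trans hji hdvd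
  have : ¬ (j : Int) ∣ m := hinv j (by omega) (by omega)
  exact this hjm

theorem checkA_iff (n b : Int) : ∀ (k : Nat), ∀ (i m : Int), i = b - k → 2 ≤ i → 0 < m →
    (∀ j : Int, 2 ≤ j → j < i → ¬ j ∣ m) →
    (∀ t : Int, i ≤ t → (t * t ∣ m ↔ t * t ∣ n)) →
    (checkA m (PySem.List.pyRange i b 1) = true ↔ ∃ t : Int, i ≤ t ∧ t < b ∧ t * t ∣ n) := by
  intro k
  induction k with
  | zero =>
    intro i m hik hi hm hinv hpres
    rw [PySem.List.pyRange_one_eq_nil (by omega)]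
    simp only [checkA]
    constructor
    · intro h; exact absurd h (by simp)
    · rintro ⟨t, h1, h2, _⟩; omega
  | succ k ih =>
    intro i m hik hi hm hinv hpres
    have hib : i < b := by omega
    rw [PySem.List.pyRange_one_cons hib]
    by_cases hdvd : i ∣ m
    · have hmod : PySem.Int.mod m i = 0 := (PySem.Int.mod_eq_zero_iff_dvd m i).mpr hdvd
      obtain ⟨e, m', heq, hfact, hm', hnd, hge1⟩ := stripA_spec i hi m 0 hm
      simp only [checkA, hmod, if_pos, heq, zero_add]
      by_cases he2 : 2 ≤ e
      · rw [if_pos (by exact_mod_cast he2)]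
        have hii : i * i ∣ m := by
          rw [hfact]
          exact Dvd.dvd.mul_right (by rw [← pow_two]; exact pow_dvd_pow i he2) m'
        simp only [true_iff]
        exact ⟨i, le_refl i, hib, (hpres i (le_refl i)).mp hii⟩
      · have he1 : e = 1 := by
          have := hge1 hdvd; omega
        subst he1
        rw [if_neg (by simp)]
        rw [pow_one] at hfact
        have hm'm : m' ∣ m := ⟨i, by rw [hfact]; ring⟩
        have hiprime : Prime i := state_prime i m hi hm hinv hdvd
        have hnii : ¬ i * i ∣ m := by
          intro ⟨c, hcc⟩
          apply hnd
          refine ⟨c, ?_⟩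
          have : i * m' = i * (i * c) := by rw [← hfact, hcc]; ring
          exact mul_left_cancel₀ (by omega) this
        have hrec := ih (i + 1) m' (by omega) (by omega) hm'
          (fun j hj2 hji hjm' => by
            rcases lt_or_eq_of_le (show j ≤ i by omega) with h | h
            · exact hinv j hj2 h (dvd_trans hjm' hm'm)
            · subst h; exact hnd hjm')
          (fun t ht => by
            constructor
            · intro h
              exact (hpres t (by omega)).mp (dvd_trans h hm'm)
            · intro h
              have htm : t * t ∣ m := (hpres t (by omega)).mpr h
              rw [hfact] at htm
              have hit : ¬ i ∣ t := by
                intro hit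
                apply hnd
                have : i * i ∣ i * m' := dvd_trans (mul_dvd_mul hit hit) htm
                obtain ⟨c, hcc⟩ := this
                refine ⟨c, ?_⟩
                have : i * m' = i * (i * c) := by rw [hcc]; ring
                exact mul_left_cancel₀ (by omega) this
              have hcop : IsCoprime i (t * t) := by
                rw [Prime.coprime_iff_not_dvd hiprime]
                intro h'
                rcases hiprime.dvd_mul.mp h' with h'' | h'' <;> exact hit h''
              exact (hcop.symm.dvd_of_dvd_mul_left (by rwa [mul_comm] at htm))
          )
        rw [hrec]
        constructor
        · rintro ⟨t, h1, h2, h3⟩; exact ⟨t, by omega, h2, h3⟩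
        · rintro ⟨t, h1, h2, h3⟩
          refine ⟨t, ?_, h2, h3⟩
          rcases lt_or_eq_of_le h1 with h | h
          · omega
          · exfalso; rw [← h] at h3
            exact hnii ((hpres i (le_refl i)).mpr h3)
    · have hmod : PySem.Int.mod m i ≠ 0 := fun h =>
        hdvd ((PySem.Int.mod_eq_zero_iff_dvd m i).mp h)
      simp only [checkA, if_neg hmod]
      have hrec := ih (i + 1) m (by omega) (by omega) hm
        (fun j hj2 hji hjm => by
          rcases lt_or_eq_of_le (show j ≤ i by omega) with h | h
          · exact hinv j hj2 h hjm
          · subst h; exact hdvd hjm)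
        (fun t ht => hpres t (by omega))
      rw [hrec]
      constructor
      · rintro ⟨t, h1, h2, h3⟩; exact ⟨t, by omega, h2, h3⟩
      · rintro ⟨t, h1, h2, h3⟩
        refine ⟨t, ?_, h2, h3⟩
        rcases lt_or_eq_of_le h1 with h | h
        · omega
        · exfalso; rw [← h] at h3
          exact hdvd (dvd_trans (dvd_mul_left i i) ((hpres i (le_refl i)).mpr h3))
      
theorem check_alt_iff (n : Int) :
    check_alt n = true ↔ ∃ t : Int, 2 ≤ t ∧ t < pyIsqrt n + 1 ∧ t * t ∣ n := by
  simp only [check_alt, List.any_eq_true, PySem.List.mem_pyRange_one, beq_iff_eq,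
    PySem.Int.mod_eq_zero_iff_dvd]
  constructor
  · rintro ⟨t, ⟨h1, h2⟩, h3⟩; exact ⟨t, h1, h2, h3⟩
  · rintro ⟨t, h1, h2, h3⟩; exact ⟨t, ⟨h1, h2⟩, h3⟩

theorem check_spec : Claim_equal_check := by
  intro n _ hpre
  unfold Spec_check
  rcases eq_or_lt_of_le hpre with h0 | hn
  · subst h0; decide
  · have hb : (2 : Int) ≤ pyIsqrt n + 1 := by
      unfold pyIsqrt
      have : 1 ≤ Nat.sqrt n.toNat := Nat.sqrt_pos.mpr (by omega)
      omega
    have hA := checkA_iff n (pyIsqrt n + 1) (pyIsqrt n + 1 - 2).toNat 2 n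
      (by omega) (by omega) hn
      (fun j hj2 hji _ => by omega)
      (fun t _ => Iff.rfl)
    have hB := check_alt_iff n
    rw [show check n = checkA n (PySem.List.pyRange 2 (pyIsqrt n + 1) 1) from rfl] at *
    cases hc : checkA n (PySem.List.pyRange 2 (pyIsqrt n + 1) 1)
    · cases hc' : check_alt n
      · rfl
      · exfalso
        obtain ⟨t, h1, h2, h3⟩ := hB.mp hc'
        have := hA.mpr ⟨t, h1, h2, h3⟩
        rw [hc] at this; exact Bool.false_ne_true this
    · cases hc' : check_alt n
      · exfalso
        obtain ⟨t, h1, h2, h3⟩ := hA.mp hc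
        have := hB.mpr ⟨t, h1, h2, h3⟩
        rw [hc'] at this; exact Bool.false_ne_true this
      · rfl
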